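-- pv_equiv track=rewrite | github.com/gmao-ckung/advent_of_code | 2020/day11.py | search_occ_E
-- ===== SOURCE A (Python) =====
-- def search_occ_E(startRow, startCol, layout):
--     maxCol = len(layout[1])
--     currCol = startCol + 1
--     while currCol < maxCol:
--         if layout[startRow][currCol] == '#':
--             return True
--         elif layout[startRow][currCol] == 'L':
--             return False
--         else:
--             currCol = currCol + 1
--     return False
-- ===== SOURCE B (Python) =====
-- def search_occ_E(startRow, startCol, layout):
--     sub = layout[startRow][startCol + 1 : len(layout[1])]
--     h = sub.index('#') if '#' in sub else -1
--     l = sub.index('L') if 'L' in sub else -1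
--     if h == -1:
--         return False
--     if l == -1:
--         return True
--     return h < l
-- ===== Notes on version B (the rewrite author's own statement) =====
-- stated objective: simpler
-- what changed: Replaces the index-bounded while loop with early returns by slicing the row segment east of startCol and comparing the positions of the first '#' and first 'L' located by two independent searches.
-- outside the precondition, e.g. on search_occ_E(0, -3, [['#', '.', '.'], ['L', '.', '.']]): A returns True, B returns False; on search_occ_E(5, 10, [['.'], ['.']]): A returns False, B raises IndexError; on search_occ_E(0, 0, [['.', '.'], ['L', '.', '#']]): A raises IndexError, B returns False
import Mathlib
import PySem

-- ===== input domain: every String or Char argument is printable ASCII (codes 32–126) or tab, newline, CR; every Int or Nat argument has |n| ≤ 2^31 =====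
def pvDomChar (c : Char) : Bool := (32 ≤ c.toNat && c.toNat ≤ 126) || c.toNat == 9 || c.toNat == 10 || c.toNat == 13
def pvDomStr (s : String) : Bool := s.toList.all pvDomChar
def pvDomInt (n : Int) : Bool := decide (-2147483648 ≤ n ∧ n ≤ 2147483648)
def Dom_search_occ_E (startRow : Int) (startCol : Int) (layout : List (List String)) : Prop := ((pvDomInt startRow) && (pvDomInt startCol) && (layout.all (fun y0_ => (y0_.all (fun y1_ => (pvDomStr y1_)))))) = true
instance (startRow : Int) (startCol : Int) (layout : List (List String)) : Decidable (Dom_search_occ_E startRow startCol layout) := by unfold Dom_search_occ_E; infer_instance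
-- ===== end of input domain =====

-- B replaces A's bounded while loop (first seat decides) by slicing the east segment and
-- comparing the positions of the first '#' and first 'L' found by two independent searches (objective: simpler).

-- ===== PORT A =====
-- the while loop: scan columns currCol, currCol+1, … while < maxCol
def searchLoopA (layout : List (List String)) (startRow : Int) (maxCol : Int) (currCol : Int) : Bool :=
  if h : currCol < maxCol then
    if PySem.List.pyGetD (PySem.List.pyGetD layout startRow []) currCol "" == "#" then true
    else if PySem.List.pyGetD (PySem.List.pyGetD layout startRow []) currCol "" == "L" then false
    else searchLoopA layout startRow maxCol (currCol + 1)
  else false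
termination_by (maxCol - currCol).toNat
decreasing_by omega

def search_occ_E (startRow : Int) (startCol : Int) (layout : List (List String)) : Bool :=
  let maxCol : Int := (PySem.List.pyGetD layout 1 []).length
  searchLoopA layout startRow maxCol (startCol + 1)

-- ===== PORT B =====
def search_occ_E_alt (startRow : Int) (startCol : Int) (layout : List (List String)) : Bool :=
  let sub := PySem.List.slice (PySem.List.pyGetD layout startRow []) (some (startCol + 1))
              (some ((PySem.List.pyGetD layout 1 []).length : Int))
  let h : Int := match PySem.List.index? sub "#" with | some i => (i : Int) | none => -1
  let l : Int := match PySem.List.index? sub "L" with | some i => (i : Int) | none => -1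
  if h == -1 then false
  else if l == -1 then true
  else decide (h < l)

-- ===== PRECONDITION & SPEC =====
-- Pre_ keeps the inputs on which A's value is the seat-scan result: at least 2 rows, startRow a
-- valid (possibly negative, Python-style) row index, and either the scan is empty (startCol+1 is
-- already past len(layout[1])) or startCol ≥ -1 with the scanned row at least as long as row 1.
-- On a ragged shorter row the scan must meet a '#' or 'L' seat before running off the row.
-- Outside it A raises IndexError (ragged shorter row exhausted mid-scan, all floor) or returns a
-- value via negative-index wraparound of individual cells (startCol < -1), an accident of indexing.
def Pre_search_occ_E (startRow : Int) (startCol : Int) (layout : List (List String)) : Prop :=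
  2 ≤ layout.length ∧ -(layout.length : Int) ≤ startRow ∧ startRow < layout.length ∧
  (((layout.getD 1 []).length : Int) ≤ startCol + 1 ∨
    (-1 ≤ startCol ∧
      ((layout.getD 1 []).length ≤ (PySem.List.pyGetD layout startRow []).length ∨
       "#" ∈ PySem.List.slice (PySem.List.pyGetD layout startRow []) (some (startCol + 1))
              (some ((layout.getD 1 []).length : Int)) ∨
       "L" ∈ PySem.List.slice (PySem.List.pyGetD layout startRow []) (some (startCol + 1))
              (some ((layout.getD 1 []).length : Int)))))
instance (startRow : Int) (startCol : Int) (layout : List (List String)) : Decidable (Pre_search_occ_E startRow startCol layout) := by unfold Pre_search_occ_E; infer_instance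

def pvWitness_search_occ_E : Int × Int × List (List String) :=
  (0, -1, [[".", "#", "."], ["L", ".", "."]])

def Spec_search_occ_E (startRow : Int) (startCol : Int) (layout : List (List String)) (out : Bool) : Prop := out = search_occ_E_alt startRow startCol layout
instance (startRow : Int) (startCol : Int) (layout : List (List String)) (out : Bool) : Decidable (Spec_search_occ_E startRow startCol layout out) := by unfold Spec_search_occ_E; infer_instance

-- ===== CLAIM (what is proved, stated in full; the proofs are below) =====
def Claim_equal_search_occ_E : Prop := ∀ (startRow : Int) (startCol : Int) (layout : List (List String)), Dom_search_occ_E startRow startCol layout → Pre_search_occ_E startRow startCol layout → Spec_search_occ_E startRow startCol layout (search_occ_E startRow startCol layout)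

-- ===== LEMMAS AND PROOFS =====

-- proof-side scan: first decisive seat in a list
def scanList : List String → Bool
  | [] => false
  | x :: xs => if x == "#" then true else if x == "L" then false else scanList xs

-- A's loop equals scanning the slice row[currCol:maxCol]
theorem loopA_eq_scan (layout : List (List String)) (startRow : Int) (maxCol : Int)
    (hm0 : 0 ≤ maxCol) :
    ∀ (n : Nat) (currCol : Int), (maxCol - currCol).toNat = n → 0 ≤ currCol →
    (maxCol ≤ (PySem.List.pyGetD layout startRow []).length ∨
     "#" ∈ PySem.List.slice (PySem.List.pyGetD layout startRow []) (some currCol) (some maxCol) ∨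
     "L" ∈ PySem.List.slice (PySem.List.pyGetD layout startRow []) (some currCol) (some maxCol)) →
    searchLoopA layout startRow maxCol currCol
      = scanList (PySem.List.slice (PySem.List.pyGetD layout startRow []) (some currCol) (some maxCol)) := by
  intro n
  induction n with
  | zero =>
    intro currCol hn hc hm
    set row := PySem.List.pyGetD layout startRow [] with hrow
    have h : ¬ currCol < maxCol := by omega
    rw [searchLoopA, dif_neg h]
    rw [PySem.List.slice_toNat _ hc hm0]
    have hk : maxCol.toNat - currCol.toNat = 0 := by omega
    rw [hk, List.take_zero]
    simp [scanList]
  | succ n ih =>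
    intro currCol hn hc hm
    set row := PySem.List.pyGetD layout startRow [] with hrow
    have h : currCol < maxCol := by omega
    -- the cell at currCol is in range: either maxCol ≤ len, or a decisive seat lies in the slice
    have hlt : currCol < (row.length : Int) := by
      by_contra hge
      have hnil : PySem.List.slice row (some currCol) (some maxCol) = [] := by
        rw [PySem.List.slice_toNat _ hc hm0, List.drop_eq_nil_of_le (by omega), List.take_nil]
      rcases hm with hm | hm | hm
      · omega
      · rw [hnil] at hm; simp at hm
      · rw [hnil] at hm; simp at hm
    have hltn : currCol.toNat < row.length := by omega
    have hsl : PySem.List.slice row (some currCol) (some maxCol)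
        = row[currCol.toNat]'hltn :: PySem.List.slice row (some (currCol + 1)) (some maxCol) := by
      have h1n : (currCol + 1).toNat = currCol.toNat + 1 := by omega
      rw [PySem.List.slice_toNat _ hc hm0, PySem.List.slice_toNat _ (by omega) hm0, h1n]
      rw [List.drop_eq_getElem_cons (by omega)]
      have hk : maxCol.toNat - currCol.toNat = (maxCol.toNat - (currCol.toNat + 1)) + 1 := by omega
      rw [hk, List.take_succ_cons]
    have hget : PySem.List.pyGetD row currCol "" = row[currCol.toNat]'hltn :=
      PySem.List.pyGetD_eq_getElem row "" hc hlt
    rw [searchLoopA, dif_pos h, hsl]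
    rw [scanList, hget]
    split_ifs with h1 h2
    · rfl
    · rfl
    · have h1' : row[currCol.toNat]'hltn ≠ "#" := by simpa using h1
      have h2' : row[currCol.toNat]'hltn ≠ "L" := by simpa using h2
      refine ih (currCol + 1) (by omega) (by omega) ?_
      rcases hm with hm | hm | hm
      · exact Or.inl hm
      · rw [hsl] at hm
        rcases List.mem_cons.mp hm with he | hm
        · exact absurd he.symm h1'
        · exact Or.inr (Or.inl hm)
      · rw [hsl] at hm
        rcases List.mem_cons.mp hm with he | hm
        · exact absurd he.symm h2'
        · exact Or.inr (Or.inr hm)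

-- scanning equals B's two-find-and-compare on any list
theorem scan_eq_find (xs : List String) :
    scanList xs
      = (let h : Int := match PySem.List.index? xs "#" with | some i => (i : Int) | none => -1
         let l : Int := match PySem.List.index? xs "L" with | some i => (i : Int) | none => -1
         if h == -1 then false else if l == -1 then true else decide (h < l)) := by
  induction xs with
  | nil => simp [scanList, PySem.List.index?]
  | cons x xs ih =>
    by_cases hx : x = "#"
    · subst hx
      have h1 : PySem.List.index? ("#" :: xs) "#" = some 0 := PySem.List.index?_cons_self ..
      have h2 : PySem.List.index? ("#" :: xs) "L" = (PySem.List.index? xs "L").map (· + 1) :=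
        PySem.List.index?_cons_of_ne xs (by decide)
      simp only [scanList, h1, h2]
      cases PySem.List.index? xs "L" <;> simp
    · by_cases hL : x = "L"
      · subst hL
        have h1 : PySem.List.index? ("L" :: xs) "#" = (PySem.List.index? xs "#").map (· + 1) :=
          PySem.List.index?_cons_of_ne xs (by decide)
        have h2 : PySem.List.index? ("L" :: xs) "L" = some 0 := PySem.List.index?_cons_self ..
        simp only [scanList, h1, h2]
        cases PySem.List.index? xs "#" <;> simp <;> omega
      · have h1 : PySem.List.index? (x :: xs) "#" = (PySem.List.index? xs "#").map (· + 1) :=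
          PySem.List.index?_cons_of_ne xs hx
        have h2 : PySem.List.index? (x :: xs) "L" = (PySem.List.index? xs "L").map (· + 1) :=
          PySem.List.index?_cons_of_ne xs hL
        simp only [scanList, h1, h2, beq_iff_eq, hx, hL, if_false]
        rw [ih]
        rcases PySem.List.index? xs "#" with _ | i <;> rcases PySem.List.index? xs "L" with _ | j
        · simp
        · simp
        · simp
          omega
        · simp [show ¬((i : Int) + 1 = -1) by omega, show ¬((j : Int) + 1 = -1) by omega]

-- ===== VERDICT (by name: the statement is the Claim_ definition above) =====
theorem search_occ_E_spec : Claim_equal_search_occ_E := by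
  intro startRow startCol layout _ hpre
  obtain ⟨h2, hrneg, hrlt, hdisj⟩ := hpre
  unfold Spec_search_occ_E search_occ_E search_occ_E_alt
  have h1row : PySem.List.pyGetD layout 1 [] = layout.getD 1 [] := by
    rw [PySem.List.pyGetD_eq_getElem layout [] (by omega) (by omega)]
    simp [List.getD, List.getElem?_eq_getElem (show 1 < layout.length by omega)]
  rcases hdisj with hskip | ⟨hc1, hlen⟩
  · -- the loop body never runs: startCol + 1 ≥ maxCol, both sides are false
    have hnotlt : ¬ startCol + 1 < ((PySem.List.pyGetD layout 1 []).length : Int) := by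
      rw [h1row]; omega
    rw [searchLoopA, dif_neg hnotlt]
    have hempty : PySem.List.slice (PySem.List.pyGetD layout startRow []) (some (startCol + 1))
        (some ((PySem.List.pyGetD layout 1 []).length : Int)) = [] := by
      rw [PySem.List.slice_toNat _ (by omega) (by omega)]
      have hz : ((PySem.List.pyGetD layout 1 []).length : Int).toNat - (startCol + 1).toNat = 0 := by
        rw [h1row]; omega
      rw [hz, List.take_zero]
    simp [hempty, PySem.List.index?]
  · rw [loopA_eq_scan layout startRow _ (by omega) _ _ rfl (by omega)
          (by rw [h1row]
              rcases hlen with hlen | hlen | hlen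
              · exact Or.inl (by exact_mod_cast hlen)
              · exact Or.inr (Or.inl hlen)
              · exact Or.inr (Or.inr hlen)),
        scan_eq_find]
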